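-- pv_equiv track=rewrite | github.com/disjaiz/Flames-Game | Flames.py | finding_magic_word
-- ===== SOURCE A (Python) =====
-- def finding_magic_word(count):
--
--   result= ""
--   removed_letter=[]
--   total_letter =["f","l","a","m","e","s"]
--   str_flame= list(count* count * "flames")
--
--   while len(removed_letter) < 5:
--     removed_letter.append(str_flame[count-1])
--     jumping_letter = str_flame[count-1]
--
--     str_flame = str_flame[count:]
--
--     while jumping_letter in str_flame:
--       str_flame.remove(jumping_letter)
--
--   for letter in total_letter:
--     if letter not in removed_letter:
--       result = letter
--   return result
-- ===== SOURCE B (Python) =====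
-- def finding_magic_word(count):
--     # Josephus-style elimination directly on the 6 distinct letters:
--     # instead of materialising count*count copies of "flames" and scanning
--     # them, keep the remaining letters and a cursor, stepping by count with
--     # modular arithmetic.
--     letters = list("flames")
--     i = 0
--     while len(letters) > 1:
--         i = (i + count - 1) % len(letters)
--         letters.pop(i)
--     return letters[0]
-- ===== Notes on version B (the rewrite author's own statement) =====
-- stated objective: faster
-- what changed: Replaces A's simulation over a count*count*6-character list (repeated slicing and one-at-a-time remove() of every copy of each eliminated letter) by a Josephus-style elimination on the 6 distinct letters with a modular cursor.
import Mathlib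
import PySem

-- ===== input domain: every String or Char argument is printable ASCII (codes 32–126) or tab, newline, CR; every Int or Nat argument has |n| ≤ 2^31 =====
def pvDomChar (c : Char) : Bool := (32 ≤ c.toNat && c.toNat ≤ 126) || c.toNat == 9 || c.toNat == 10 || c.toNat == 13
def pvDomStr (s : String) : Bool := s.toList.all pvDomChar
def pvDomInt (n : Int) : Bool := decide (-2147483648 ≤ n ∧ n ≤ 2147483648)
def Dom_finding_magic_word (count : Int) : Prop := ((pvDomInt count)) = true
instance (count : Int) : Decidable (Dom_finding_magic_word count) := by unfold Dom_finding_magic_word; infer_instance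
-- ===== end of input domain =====

-- B replaces A's walk over a count*count*6-character list by a Josephus-style
-- elimination on the 6 distinct letters with a modular cursor (asymptotically faster).

-- ===== PORT A =====

-- `while jumping_letter in str_flame: str_flame.remove(jumping_letter)`
-- (list.remove removes the first occurrence = List.erase; the loop repeats while present)
def pvRemoveAll (x : Char) (l : List Char) : List Char :=
  if h : x ∈ l then pvRemoveAll x (l.erase x) else l
termination_by l.length
decreasing_by
  have h1 : (l.erase x).length = l.length - 1 := List.length_erase_of_mem h
  have h2 : 0 < l.length := List.length_pos_of_mem h
  omega

-- `while len(removed_letter) < 5:` — removed grows by one each pass, so exactly 5 passes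
-- (fuel 5); `none` = the IndexError of `str_flame[count-1]`.
def pvLoopA (count : Int) : Nat → List Char → List Char → Option (List Char)
  | 0, _, removed => some removed
  | n + 1, strFlame, removed =>
      match PySem.List.pyGet? strFlame (count - 1) with
      | none => none          -- IndexError
      | some j =>
          pvLoopA count n (pvRemoveAll j (PySem.List.slice strFlame (some count) none))
            (removed ++ [j])

def finding_magic_word (count : Int) : String :=
  -- list(count * count * "flames"): string repetition (empty when count*count ≤ 0)
  let strFlame : List Char :=
    List.flatten (List.replicate (count * count).toNat ['f', 'l', 'a', 'm', 'e', 's'])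
  match pvLoopA count 5 strFlame [] with
  | none => ""                -- the Python raises IndexError here (outside Pre_)
  | some removed =>
      -- for letter in total_letter: if letter not in removed_letter: result = letter
      List.foldl (fun result letter => if letter ∈ removed then result else String.mk [letter])
        "" ['f', 'l', 'a', 'm', 'e', 's']

-- ===== PORT B =====

-- while len(letters) > 1: i = (i + count - 1) % len(letters); letters.pop(i)
-- the list shrinks by one per pass, so its length bounds the number of passes (fuel)
def pvLoopB (count : Int) : Nat → List Char → Int → List Char
  | 0, letters, _ => letters
  | fuel + 1, letters, i =>
      if 1 < letters.length then
        match PySem.List.pop? letters (PySem.Int.mod (i + count - 1) (letters.length : Int)) with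
        | some (_, rest) => pvLoopB count fuel rest (PySem.Int.mod (i + count - 1) (letters.length : Int))
        | none => letters       -- unreachable: the modular index is always in range
      else letters

def finding_magic_word_alt (count : Int) : String :=
  let letters := "flames".toList
  match PySem.List.pyGet? (pvLoopB count letters.length letters 0) 0 with
  | some c => String.mk [c]
  | none => ""

-- ===== PRECONDITION & SPEC =====
-- A raises IndexError for every count ≤ 0 (the repeated string is empty, or the
-- negative indexing/slicing eventually exhausts the list).
def Pre_finding_magic_word (count : Int) : Prop := 1 ≤ count
instance (count : Int) : Decidable (Pre_finding_magic_word count) := by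
  unfold Pre_finding_magic_word; infer_instance

def pvWitness_finding_magic_word : Int := 3

def Spec_finding_magic_word (count : Int) (out : String) : Prop := out = finding_magic_word_alt count
instance (count : Int) (out : String) : Decidable (Spec_finding_magic_word count out) := by
  unfold Spec_finding_magic_word; infer_instance

-- ===== CLAIM (what is proved, stated in full; the proofs are below) =====
def Claim_equal_finding_magic_word : Prop :=
  ∀ (count : Int), Dom_finding_magic_word count → Pre_finding_magic_word count →
    Spec_finding_magic_word count (finding_magic_word count)

-- ===== LEMMAS AND PROOFS =====

-- `pvCyc v L` = the first L characters of the infinite periodic stream v v v …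
def pvCyc (v : List Char) (L : Nat) : List Char :=
  (List.range L).map (fun t => v.getD (t % v.length) 'f')

theorem length_pvCyc (v : List Char) (L : Nat) : (pvCyc v L).length = L := by simp [pvCyc]

theorem getElem_pvCyc (v : List Char) (L t : Nat) (h : t < (pvCyc v L).length) :
    (pvCyc v L)[t] = v.getD (t % v.length) 'f' := by
  simp [pvCyc] at h ⊢

theorem filter_erase_self (x : Char) (l : List Char) :
    (l.erase x).filter (fun c => c != x) = l.filter (fun c => c != x) := by
  induction l with
  | nil => simp
  | cons a t ih =>
      by_cases hax : a = x
      · subst hax; simp [List.erase_cons_head]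
      · rw [List.erase_cons_tail (by simpa using hax)]
        simp [hax, ih]

theorem pvRemoveAll_eq_filter (x : Char) (l : List Char) :
    pvRemoveAll x l = l.filter (fun c => c != x) := by
  induction l using pvRemoveAll.induct x with
  | case1 l h ih =>
      rw [pvRemoveAll]; simp only [h, dite_true, ih, filter_erase_self]
  | case2 l h =>
      rw [pvRemoveAll]; simp only [h, dite_false]
      exact (List.filter_eq_self.mpr (fun a ha => by
        simp only [bne_iff_ne, ne_eq]; rintro rfl; exact h ha)).symm

theorem drop_pvCyc (v : List Char) (L k : Nat) (hv : v ≠ []) (hk : k ≤ L) :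
    (pvCyc v L).drop k = pvCyc (v.rotate k) (L - k) := by
  have hm : 0 < v.length := List.length_pos_of_ne_nil hv
  apply List.ext_getElem
  · simp [pvCyc]
  · intro t h1 h2
    rw [List.getElem_drop]
    rw [getElem_pvCyc, getElem_pvCyc]
    have hrl : (v.rotate k).length = v.length := List.length_rotate v k
    rw [hrl]
    have hlt : t % v.length < v.length := Nat.mod_lt _ hm
    rw [List.getD_eq_getElem v 'f' (by exact Nat.mod_lt _ hm),
        List.getD_eq_getElem (v.rotate k) 'f' (by rw [hrl]; exact Nat.mod_lt _ hm)]
    rw [List.getElem_rotate]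
    congr 1
    rw [Nat.mod_add_mod]
    ring_nf

theorem pvCyc_le (v : List Char) (L : Nat) (h : L ≤ v.length) :
    pvCyc v L = v.take L := by
  apply List.ext_getElem
  · simp [pvCyc, Nat.min_eq_left h]
  · intro t h1 h2
    rw [getElem_pvCyc, List.getElem_take]
    rw [Nat.mod_eq_of_lt (by simp [pvCyc] at h1; omega)]
    exact List.getD_eq_getElem v 'f' _

theorem pvCyc_add (v : List Char) (L : Nat) (hv : v ≠ []) :
    pvCyc v (v.length + L) = v ++ pvCyc v L := by
  have hm : 0 < v.length := List.length_pos_of_ne_nil hv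
  apply List.ext_getElem
  · simp [pvCyc]
  · intro t h1 h2
    rw [getElem_pvCyc]
    by_cases ht : t < v.length
    · rw [List.getElem_append_left ht, Nat.mod_eq_of_lt ht]
      exact List.getD_eq_getElem v 'f' _
    · push_neg at ht
      rw [List.getElem_append_right ht, getElem_pvCyc]
      congr 1
      conv_lhs => rw [show t = (t - v.length) + v.length from by omega]
      rw [Nat.add_mod_right]

theorem filter_pvCyc (w : List Char) (x : Char) (L : Nat) (hw : w ≠ []) (hx : x ∉ w) :
    (pvCyc (w ++ [x]) L).filter (fun c => c != x)
      = pvCyc w (L - L / (w.length + 1)) := by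
  induction L using Nat.strong_induction_on with
  | _ L ih =>
    set m := w.length + 1 with hm
    have hlen : (w ++ [x]).length = m := by simp [hm]
    have hfw : w.filter (fun c => c != x) = w := List.filter_eq_self.mpr (fun a ha => by
      simp only [bne_iff_ne, ne_eq, decide_eq_true_eq]; rintro rfl; exact hx ha)
    have hfx : (w ++ [x]).filter (fun c => c != x) = w := by
      rw [List.filter_append, hfw]; simp
    by_cases hL : L ≤ w.length
    · rw [pvCyc_le _ _ (by omega), List.take_append_of_le_length hL]
      have hdiv : L / m = 0 := Nat.div_eq_of_lt (by omega)
      rw [hdiv, Nat.sub_zero, pvCyc_le _ _ hL]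
      apply List.filter_eq_self.mpr
      intro a ha
      have : a ∈ w := List.mem_of_mem_take ha
      simp only [bne_iff_ne, ne_eq, decide_eq_true_eq]
      rintro rfl; exact hx this
    · by_cases hLm : L = m
      · subst hLm
        have h1 : pvCyc (w ++ [x]) m = w ++ [x] := by
          rw [← hlen, pvCyc_le _ _ (le_refl _), List.take_length]
        rw [h1, hfx]
        have h2 : m - m / m = w.length := by
          have := Nat.div_self (show 0 < m by omega); omega
        rw [h2, pvCyc_le _ _ (le_refl _), List.take_length]
      · have hgt : m ≤ L := by omega
        have hL' : L = m + (L - m) := by omega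
        have hsplit : pvCyc (w ++ [x]) L = (w ++ [x]) ++ pvCyc (w ++ [x]) (L - m) := by
          have h0 := pvCyc_add (w ++ [x]) (L - m) (by simp)
          rw [hlen] at h0
          rw [← h0]
          congr 1
        rw [hsplit, List.filter_append, hfx, ih (L - m) (by omega)]
        have hq : (L - m) / m ≤ L - m := Nat.div_le_self _ _
        have harith : L - L / m = (m - 1) + ((L - m) - (L - m) / m) := by
          have : L / m = (L - m) / m + 1 := by
            conv_lhs => rw [hL', Nat.add_comm m (L - m)]
            exact Nat.add_div_right _ (by omega)
          omega
        rw [harith, show m - 1 = w.length from by omega, pvCyc_add _ _ hw]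

theorem rotate_dropLast (l : List Char) (p : Nat) (hp : p < l.length) :
    (l.rotate (p + 1)).dropLast = (l.eraseIdx p).rotate (p % (l.length - 1)) := by
  by_cases hp1 : p + 1 = l.length
  · rw [hp1, List.rotate_length]
    by_cases h2 : l.length = 1
    · obtain ⟨a, rfl⟩ := List.length_eq_one_iff.mp h2
      have hp0 : p = 0 := by simpa using hp
      subst hp0; simp
    · have h3 : l.eraseIdx p = l.dropLast := by
        rw [List.dropLast_eq_take, List.eraseIdx_eq_take_drop_succ, hp1]
        simp [show p = l.length - 1 from by omega]
      rw [h3, show p = l.length - 1 from by omega, Nat.mod_self, List.rotate_zero]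
  · have hplt : p + 1 < l.length := by omega
    rw [List.rotate_eq_drop_append_take (by omega)]
    have htne : l.take (p + 1) ≠ [] := by
      intro hc
      have := congrArg List.length hc
      simp [Nat.min_eq_left (le_of_lt hplt)] at this
    rw [List.dropLast_append_of_ne_nil htne]
    have hdl : (l.take (p + 1)).dropLast = l.take p := by
      rw [List.dropLast_eq_take, List.take_take]
      congr 1
      simp [Nat.min_eq_left (le_of_lt hplt)]
    rw [hdl]
    have hpm : p % (l.length - 1) = p := Nat.mod_eq_of_lt (by omega)
    rw [hpm, List.eraseIdx_eq_take_drop_succ,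
        List.rotate_eq_drop_append_take (by simp [List.length_take, List.length_drop]; omega)]
    have hwtl : (l.take p).length = p := by simp; omega
    rw [List.drop_append_of_le_length (le_of_eq hwtl.symm), List.take_append_of_le_length (le_of_eq hwtl.symm)]
    have hd : List.drop p (List.take p l) = [] := by simp [List.drop_take]
    have ht : List.take p (List.take p l) = List.take p l := by rw [List.take_take]; simp
    rw [hd, ht]
    simp

-- how much of the stream each pass needs: `nn ≤ L` for the indexing/slicing, and the
-- exact length left for the next pass: drop nn, then delete every copy of the letter
-- that now sits at the end of the (fuel+2)-letter period.
def pvEnough : Nat → Nat → Nat → Prop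
  | 0, _, _ => True
  | f + 1, nn, L => nn ≤ L ∧ pvEnough f nn ((L - nn) - (L - nn) / (f + 2))

theorem pvEnough_start (nn N : Nat) (h1 : 1 ≤ nn)
    (h : (nn = 1 ∧ N = 1) ∨ (nn = 2 ∧ N = 4) ∨ (3 ≤ nn ∧ 3 * nn ≤ N)) :
    pvEnough 5 nn (N * 6) := by
  obtain ⟨rfl, rfl⟩ | ⟨rfl, rfl⟩ | ⟨h2, h3⟩ := h
  · exact ⟨by norm_num, by norm_num, by norm_num, by norm_num, by norm_num, trivial⟩
  · exact ⟨by norm_num, by norm_num, by norm_num, by norm_num, by norm_num, trivial⟩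
  · have k1 : 14*nn ≤ N*6 - nn - (N*6 - nn)/6 := by omega
    have k2 : 10*nn ≤ (N*6 - nn - (N*6 - nn)/6) - nn - ((N*6 - nn - (N*6 - nn)/6) - nn)/5 := by omega
    have k3 : 6*nn ≤ ((N*6 - nn - (N*6 - nn)/6) - nn - ((N*6 - nn - (N*6 - nn)/6) - nn)/5) - nn
        - (((N*6 - nn - (N*6 - nn)/6) - nn - ((N*6 - nn - (N*6 - nn)/6) - nn)/5) - nn)/4 := by omega
    have k4 : 3*nn ≤ (((N*6 - nn - (N*6 - nn)/6) - nn - ((N*6 - nn - (N*6 - nn)/6) - nn)/5) - nn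
        - (((N*6 - nn - (N*6 - nn)/6) - nn - ((N*6 - nn - (N*6 - nn)/6) - nn)/5) - nn)/4) - nn
        - ((((N*6 - nn - (N*6 - nn)/6) - nn - ((N*6 - nn - (N*6 - nn)/6) - nn)/5) - nn
        - (((N*6 - nn - (N*6 - nn)/6) - nn - ((N*6 - nn - (N*6 - nn)/6) - nn)/5) - nn)/4) - nn)/3 := by omega
    refine ⟨by omega, ?_, ?_, ?_, ?_, trivial⟩ <;> simp only [Nat.reduceAdd] <;> omega

theorem perm_getElem_eraseIdx (l : List Char) (k : Nat) (h : k < l.length) :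
    l.Perm (l[k] :: l.eraseIdx k) := by
  rw [List.eraseIdx_eq_take_drop_succ]
  conv_lhs => rw [← List.take_append_drop k l, List.drop_eq_getElem_cons h]
  exact List.perm_middle

theorem loopSim (fuel : Nat) : ∀ (n : Int) (letters : List Char) (i : Int) (L : Nat)
    (removed : List Char), 1 ≤ n → letters.Nodup → letters.length = fuel + 1 → 0 ≤ i →
    pvEnough fuel n.toNat L →
    ∃ D, pvLoopA n fuel (pvCyc (letters.rotate (i.toNat % letters.length)) L) removed
          = some (removed ++ D)
        ∧ letters.Perm (pvLoopB n (fuel + 1) letters i ++ D)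
        ∧ (pvLoopB n (fuel + 1) letters i).length = 1 := by
  induction fuel with
  | zero =>
    intro n letters i L removed hn hnd hlen hi hE
    refine ⟨[], by simp [pvLoopA], ?_, ?_⟩
    · simp [pvLoopB, hlen]
    · simp [pvLoopB, hlen]
  | succ fuel ih =>
    intro n letters i L removed hn hnd hlen hi hE
    obtain ⟨hnL, hE'⟩ := hE
    have hm2 : 2 ≤ letters.length := by omega
    have hmpos : 0 < letters.length := by omega
    have hn1 : 1 ≤ n.toNat := by omega
    have hnval : ((n.toNat : Nat) : Int) = n := Int.toNat_of_nonneg (by omega)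
    -- the A-side word and the popped letter
    have hvlen : (letters.rotate (i.toNat % letters.length)).length = letters.length :=
      List.length_rotate _ _
    have hvne : letters.rotate (i.toNat % letters.length) ≠ [] := by
      intro hc; rw [List.rotate_eq_nil_iff] at hc; subst hc; simp at hm2
    have hpNlt : (i.toNat + n.toNat - 1) % letters.length < letters.length :=
      Nat.mod_lt _ hmpos
    have hx_get : PySem.List.pyGet? (pvCyc (letters.rotate (i.toNat % letters.length)) L) (n - 1)
        = some ((letters.rotate (i.toNat % letters.length)).getD
            ((n.toNat - 1) % letters.length) 'f') := by
      have h1 : (n - 1 : Int) = ((n.toNat - 1 : Nat) : Int) := by omega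
      have hlt : n.toNat - 1 < (pvCyc (letters.rotate (i.toNat % letters.length)) L).length := by
        rw [length_pvCyc]; omega
      rw [h1, PySem.List.pyGet?_natCast, List.getElem?_eq_getElem hlt,
          getElem_pvCyc _ _ _ hlt, hvlen]
    have hmod1 : ((n.toNat - 1) % letters.length + i.toNat % letters.length) % letters.length
        = (i.toNat + n.toNat - 1) % letters.length := by
      rw [Nat.mod_add_mod, Nat.add_mod_mod]
      congr 1
      omega
    have hxl : (letters.rotate (i.toNat % letters.length)).getD
          ((n.toNat - 1) % letters.length) 'f'
        = letters[(i.toNat + n.toNat - 1) % letters.length]'hpNlt := by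
      have hlt2 : (n.toNat - 1) % letters.length
          < (letters.rotate (i.toNat % letters.length)).length := by
        rw [hvlen]; exact Nat.mod_lt _ hmpos
      rw [List.getD_eq_getElem _ 'f' hlt2]
      simp only [List.getElem_rotate, List.length_rotate]
      congr 1
    -- slicing off the first n elements rotates the word by n
    have hslice : PySem.List.slice (pvCyc (letters.rotate (i.toNat % letters.length)) L) (some n) none
        = pvCyc ((letters.rotate (i.toNat % letters.length)).rotate n.toNat) (L - n.toNat) := by
      rw [PySem.List.slice_from _ (show (0:Int) ≤ n by omega)]
      exact drop_pvCyc _ _ _ hvne hnL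
    -- the doubly rotated word, its last element is the popped letter
    have hv1 : (letters.rotate (i.toNat % letters.length)).rotate n.toNat
        = letters.rotate ((i.toNat + n.toNat - 1) % letters.length + 1) := by
      rw [List.rotate_rotate, ← List.rotate_mod letters (i.toNat % letters.length + n.toNat),
          ← List.rotate_mod letters ((i.toNat + n.toNat - 1) % letters.length + 1)]
      congr 1
      rw [Nat.mod_add_mod, Nat.mod_add_mod]
      congr 1
      omega
    have hv1len : (letters.rotate ((i.toNat + n.toNat - 1) % letters.length + 1)).length
        = letters.length := List.length_rotate _ _
    have hv1ne : letters.rotate ((i.toNat + n.toNat - 1) % letters.length + 1) ≠ [] := by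
      intro hc; rw [List.rotate_eq_nil_iff] at hc; subst hc; simp at hm2
    have hv1nodup : (letters.rotate ((i.toNat + n.toNat - 1) % letters.length + 1)).Nodup :=
      List.nodup_rotate.mpr hnd
    have hglast : (letters.rotate ((i.toNat + n.toNat - 1) % letters.length + 1)).getLast hv1ne
        = letters[(i.toNat + n.toNat - 1) % letters.length]'hpNlt := by
      rw [List.getLast_eq_getElem]
      simp only [List.getElem_rotate, hv1len]
      congr 1
      rw [show letters.length - 1 + ((i.toNat + n.toNat - 1) % letters.length + 1)
            = letters.length + (i.toNat + n.toNat - 1) % letters.length from by omega,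
          Nat.add_mod_left, Nat.mod_eq_of_lt hpNlt]
    have hv1split : letters.rotate ((i.toNat + n.toNat - 1) % letters.length + 1)
        = (letters.rotate ((i.toNat + n.toNat - 1) % letters.length + 1)).dropLast
            ++ [letters[(i.toNat + n.toNat - 1) % letters.length]'hpNlt] := by
      conv_lhs => rw [← List.dropLast_append_getLast hv1ne]
      rw [hglast]
    have hwlen : ((letters.rotate ((i.toNat + n.toNat - 1) % letters.length + 1)).dropLast).length
        = letters.length - 1 := by
      rw [List.length_dropLast, hv1len]
    have hwne : (letters.rotate ((i.toNat + n.toNat - 1) % letters.length + 1)).dropLast ≠ [] := by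
      intro hc; have h0 := congrArg List.length hc
      rw [hwlen] at h0; simp only [List.length_nil] at h0; omega
    have hxnw : letters[(i.toNat + n.toNat - 1) % letters.length]'hpNlt
        ∉ (letters.rotate ((i.toNat + n.toNat - 1) % letters.length + 1)).dropLast := by
      have h2 := hv1nodup
      rw [hv1split] at h2
      have h3 := (List.perm_append_singleton _ _).nodup_iff.mp h2
      exact (List.nodup_cons.mp h3).1
    -- A's inner removal loop: delete every copy of the popped letter
    have hrall : pvRemoveAll (letters[(i.toNat + n.toNat - 1) % letters.length]'hpNlt)
          (pvCyc (letters.rotate ((i.toNat + n.toNat - 1) % letters.length + 1)) (L - n.toNat))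
        = pvCyc ((letters.rotate ((i.toNat + n.toNat - 1) % letters.length + 1)).dropLast)
            ((L - n.toNat) - (L - n.toNat) / letters.length) := by
      rw [pvRemoveAll_eq_filter]
      conv_lhs => rw [hv1split]
      rw [filter_pvCyc _ _ _ hwne hxnw, hwlen,
          show letters.length - 1 + 1 = letters.length from by omega]
    -- the remaining word is the eraseIdx word, rotated to the cursor
    have hweq : (letters.rotate ((i.toNat + n.toNat - 1) % letters.length + 1)).dropLast
        = (letters.eraseIdx ((i.toNat + n.toNat - 1) % letters.length)).rotate
            (((i.toNat + n.toNat - 1) % letters.length) % (letters.length - 1)) :=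
      rotate_dropLast letters _ hpNlt
    -- B's one pass
    have hppos : PySem.Int.mod (i + n - 1) (letters.length : Int)
        = (((i.toNat + n.toNat - 1) % letters.length : Nat) : Int) := by
      rw [PySem.Int.mod_eq_emod_of_pos (by exact_mod_cast hmpos)]
      rw [show (i + n - 1 : Int) = ((i.toNat + n.toNat - 1 : Nat) : Int) from by omega]
      norm_cast
    have hpop : PySem.List.pop? letters
          ((((i.toNat + n.toNat - 1) % letters.length : Nat) : Nat) : Int)
        = some (letters[(i.toNat + n.toNat - 1) % letters.length]'hpNlt,
            letters.eraseIdx ((i.toNat + n.toNat - 1) % letters.length)) :=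
      PySem.List.pop?_natCast letters _ hpNlt
    have hBstep : pvLoopB n (fuel + 1 + 1) letters i
        = pvLoopB n (fuel + 1) (letters.eraseIdx ((i.toNat + n.toNat - 1) % letters.length))
            ((((i.toNat + n.toNat - 1) % letters.length : Nat) : Nat) : Int) := by
      conv_lhs => rw [pvLoopB]
      rw [if_pos (show 1 < letters.length from hm2), hppos, hpop]
    -- facts for the induction hypothesis
    have hndE : (letters.eraseIdx ((i.toNat + n.toNat - 1) % letters.length)).Nodup :=
      (List.eraseIdx_sublist _ _).nodup hnd
    have hlenE : (letters.eraseIdx ((i.toNat + n.toNat - 1) % letters.length)).length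
        = fuel + 1 := by
      rw [List.length_eraseIdx_of_lt hpNlt]; omega
    have hEnext : pvEnough fuel n.toNat ((L - n.toNat) - (L - n.toNat) / letters.length) := by
      rw [show letters.length = fuel + 2 from hlen]
      exact hE'
    obtain ⟨D', hA', hPerm', hLen'⟩ := ih n
      (letters.eraseIdx ((i.toNat + n.toNat - 1) % letters.length))
      ((((i.toNat + n.toNat - 1) % letters.length : Nat) : Nat) : Int)
      ((L - n.toNat) - (L - n.toNat) / letters.length)
      (removed ++ [letters[(i.toNat + n.toNat - 1) % letters.length]'hpNlt])
      hn hndE hlenE (by positivity) hEnext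
    -- the rotation index seen by the induction hypothesis is the one A's word carries
    have hrotidx : ((((i.toNat + n.toNat - 1) % letters.length : Nat) : Int)).toNat
          % (letters.eraseIdx ((i.toNat + n.toNat - 1) % letters.length)).length
        = ((i.toNat + n.toNat - 1) % letters.length) % (letters.length - 1) := by
      rw [Int.toNat_natCast, List.length_eraseIdx_of_lt hpNlt]
    refine ⟨letters[(i.toNat + n.toNat - 1) % letters.length]'hpNlt :: D', ?_, ?_, ?_⟩
    · -- A's pass
      show pvLoopA n (fuel + 1) _ removed = _
      simp only [pvLoopA, hx_get, hxl]
      rw [hslice, hv1, hrall, hweq]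
      rw [hrotidx] at hA'
      rw [hA']
      simp
    · -- the permutation invariant
      rw [hBstep]
      have h1 : letters.Perm
          (letters[(i.toNat + n.toNat - 1) % letters.length]'hpNlt
            :: letters.eraseIdx ((i.toNat + n.toNat - 1) % letters.length)) :=
        perm_getElem_eraseIdx letters _ hpNlt
      refine h1.trans ?_
      refine ((hPerm'.cons _).trans ?_)
      exact List.perm_middle.symm
    · rw [hBstep]
      exact hLen' 

theorem flatten_replicate_eq_pvCyc (K : Nat) (v : List Char) (hv : v ≠ []) :
    List.flatten (List.replicate K v) = pvCyc v (K * v.length) := by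
  induction K with
  | zero => simp [pvCyc]
  | succ k ih =>
      rw [List.replicate_succ, List.flatten_cons, ih, Nat.succ_mul, Nat.add_comm (k * v.length),
        pvCyc_add v _ hv]

theorem fold_const (D : List Char) (t : List Char) (s : String)
    (h : ∀ c ∈ t, c ∈ D) :
    t.foldl (fun result letter => if letter ∈ D then result else String.mk [letter]) s = s := by
  induction t generalizing s with
  | nil => rfl
  | cons a t' ih =>
      simp only [List.foldl_cons, if_pos (h a (List.mem_cons_self))]
      exact ih _ (fun c hc => h c (List.mem_cons_of_mem _ hc))

theorem fold_pick (D : List Char) (z : Char) (t : List Char) (s : String)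
    (hz : z ∉ D) (hmem : ∀ c ∈ t, c ≠ z → c ∈ D) (hzt : z ∈ t) :
    t.foldl (fun result letter => if letter ∈ D then result else String.mk [letter]) s
      = String.mk [z] := by
  induction t generalizing s with
  | nil => cases hzt
  | cons a t' ih =>
      by_cases haz : a = z
      · subst haz
        simp only [List.foldl_cons, if_neg hz]
        by_cases hzt' : a ∈ t'
        · exact ih _ (fun c hc hne => hmem c (List.mem_cons_of_mem _ hc) hne) hzt'
        · exact fold_const D t' _ (fun c hc => by
            by_cases hcz : c = a
            · subst hcz; exact absurd hc hzt'
            · exact hmem c (List.mem_cons_of_mem _ hc) hcz)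
      · have haD : a ∈ D := hmem a (List.mem_cons_self) haz
        simp only [List.foldl_cons, if_pos haD]
        have hzt'' : z ∈ t' := by
          rcases List.mem_cons.mp hzt with h | h
          · exact absurd h.symm haz
          · exact h
        exact ih _ (fun c hc hne => hmem c (List.mem_cons_of_mem _ hc) hne) hzt''

-- ===== VERDICT (by name: the statement is the Claim_ definition above) =====
theorem finding_magic_word_spec : Claim_equal_finding_magic_word := by
  unfold Claim_equal_finding_magic_word
  intro count hdom hpre
  unfold Spec_finding_magic_word
  have hn : 1 ≤ count := hpre
  have h1 : (count * count).toNat = count.toNat * count.toNat := by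
    rw [show count = ((count.toNat : Nat) : Int) from (Int.toNat_of_nonneg (by omega)).symm,
        ← Int.natCast_mul, Int.toNat_natCast, Int.toNat_natCast]
  have hE : pvEnough 5 count.toNat ((count.toNat * count.toNat) * 6) := by
    apply pvEnough_start _ _ (by omega)
    rcases Nat.lt_or_ge count.toNat 3 with h | h
    · interval_cases h2 : count.toNat
      · omega
      · left; exact ⟨rfl, rfl⟩
      · right; left; exact ⟨rfl, rfl⟩
    · right; right
      exact ⟨h, Nat.mul_le_mul_right _ h⟩
  obtain ⟨D, hA, hPerm, hLen⟩ := loopSim 5 count ['f', 'l', 'a', 'm', 'e', 's'] 0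
    ((count.toNat * count.toNat) * 6) [] hn (by decide) rfl (by omega) hE
  simp only [Int.toNat_zero, Nat.zero_mod, List.rotate_zero, List.nil_append] at hA hPerm hLen
  obtain ⟨z, hz⟩ := List.length_eq_one_iff.mp hLen
  rw [hz] at hPerm
  have hnodup : (z :: D).Nodup := hPerm.nodup (by decide)
  have hzD : z ∉ D := (List.nodup_cons.mp hnodup).1
  have hsub : ∀ c ∈ (['f', 'l', 'a', 'm', 'e', 's'] : List Char), c ≠ z → c ∈ D := by
    intro c hc hne
    rcases List.mem_cons.mp (hPerm.subset hc) with h | h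
    · exact absurd h hne
    · exact h
  have hztot : z ∈ (['f', 'l', 'a', 'm', 'e', 's'] : List Char) :=
    hPerm.symm.subset List.mem_cons_self
  have halt : finding_magic_word_alt count = String.mk [z] := by
    show (match PySem.List.pyGet? (pvLoopB count (5 + 1) ['f', 'l', 'a', 'm', 'e', 's'] 0) 0 with
      | some c => String.mk [c]
      | none => "") = String.mk [z]
    rw [hz, PySem.List.pyGet?_zero_cons]
  rw [halt]
  show (match pvLoopA count 5
      (List.flatten (List.replicate (count * count).toNat ['f', 'l', 'a', 'm', 'e', 's'])) [] with
    | none => ""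
    | some removed =>
        List.foldl (fun result letter => if letter ∈ removed then result else String.mk [letter])
          "" ['f', 'l', 'a', 'm', 'e', 's']) = String.mk [z]
  have hflat : List.flatten (List.replicate (count * count).toNat ['f', 'l', 'a', 'm', 'e', 's'])
      = pvCyc ['f', 'l', 'a', 'm', 'e', 's'] ((count.toNat * count.toNat) * 6) := by
    rw [flatten_replicate_eq_pvCyc _ _ (by decide), h1]
    rfl
  rw [hflat, hA]
  exact fold_pick D z _ _ hzD hsub hztot
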